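-- pv_equiv track=rewrite | github.com/pypi-data/pypi-mirror-383 | packages/pylay/pylay-0.5.1-py3-none-any.whl/src/core/analyzer/improvement_templates.py | _is_excluded_variable_name
-- ===== SOURCE A (Python) =====
-- def _is_excluded_variable_name(var_name: str) -> bool:
--     """変数名が除外パターンに該当するかをチェック
--
--     Args:
--         var_name: 変数名
--
--     Returns:
--         除外対象の場合True、それ以外False
--     """
--     var_lower = var_name.lower()
--
--     # 除外パターン1: 一般的な変数名（設定値、フォーマット指定、一時変数等）
--     exclude_exact = [
--         "ctx",  # click.Context等のフレームワーク変数
--         "context",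
--         "self",
--         "cls",
--         "args",
--         "kwargs",
--         "format",
--         "type",
--         "kind",
--         "mode",
--         "style",
--         "encoding",
--         "message",
--         "error",
--         "text",
--         "value",
--         "name",
--         "key",
--         "title",
--         "label",
--         "description",
--         "data",
--         "result",
--         "output",
--         "input",
--         "verbose",
--         "strict",
--         "details",
--     ]
--     # 完全一致で除外
--     if var_lower in exclude_exact:
--         return True
--
--     # 除外パターン2: サフィックスパターン
--     exclude_suffixes = [
--         "_format",
--         "_type",
--         "_kind",
--         "_mode",
--         "_style",
--         "_encoding",
--         "_message",
--         "_error",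
--         "_text",
--         "_value",
--         "_name",
--         "_key",
--         "_title",
--         "_label",
--         "_description",
--     ]
--     # サフィックスで除外
--     if any(var_lower.endswith(suffix) for suffix in exclude_suffixes):
--         return True
--
--     return False
-- ===== SOURCE B (Python) =====
-- _BASES = "format type kind mode style encoding message error text value name key title label description".split(" ")
-- _OTHER = "ctx context self cls args kwargs data result output input verbose strict details".split(" ")
--
--
-- def _is_excluded_variable_name(var_name: str) -> bool:
--     # Every suffix base word is itself an excluded exact name, so one rule
--     # covers both lists: the token after the last underscore (the whole name
--     # when there is none) decides against the 15 base words, and the remaining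
--     # 13 exact names are checked directly.
--     low = var_name.lower()
--     return low.rpartition("_")[2] in _BASES or low in _OTHER
-- ===== Notes on version B (the rewrite author's own statement) =====
-- stated objective: simpler
-- what changed: B collapses A's two passes (28-name exact scan plus a 15-iteration endswith loop) into one rule using the fact that every suffix base word is itself an exact name: the token after the last underscore (the whole name when there is none) is looked up in the 15 base words, and only the 13 remaining exact names are checked separately.
import Mathlib
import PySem

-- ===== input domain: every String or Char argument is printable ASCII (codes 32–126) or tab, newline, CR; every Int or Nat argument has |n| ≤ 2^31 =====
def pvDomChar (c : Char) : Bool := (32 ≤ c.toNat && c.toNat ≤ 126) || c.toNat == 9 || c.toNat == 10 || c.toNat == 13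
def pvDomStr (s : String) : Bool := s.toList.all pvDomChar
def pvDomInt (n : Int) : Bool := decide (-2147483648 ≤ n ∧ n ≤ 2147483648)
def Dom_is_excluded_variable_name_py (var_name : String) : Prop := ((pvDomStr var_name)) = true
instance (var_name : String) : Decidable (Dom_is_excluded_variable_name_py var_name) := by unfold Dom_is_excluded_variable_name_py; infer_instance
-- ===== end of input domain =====

-- B collapses A's exact-name scan plus 15-way endswith loop into one rule on the
-- token after the last underscore (every suffix base is itself an exact name);
-- objective: simpler.


-- ===== PORT A =====
def pyExcludeExact : List (List Char) :=
  ["ctx".toList, "context".toList, "self".toList, "cls".toList, "args".toList,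
   "kwargs".toList, "format".toList, "type".toList, "kind".toList, "mode".toList,
   "style".toList, "encoding".toList, "message".toList, "error".toList, "text".toList,
   "value".toList, "name".toList, "key".toList, "title".toList, "label".toList,
   "description".toList, "data".toList, "result".toList, "output".toList, "input".toList,
   "verbose".toList, "strict".toList, "details".toList]

def pyExcludeSuffixes : List (List Char) :=
  ["_format".toList, "_type".toList, "_kind".toList, "_mode".toList, "_style".toList,
   "_encoding".toList, "_message".toList, "_error".toList, "_text".toList, "_value".toList,
   "_name".toList, "_key".toList, "_title".toList, "_label".toList, "_description".toList]

def is_excluded_variable_name_py (var_name : String) : Bool :=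
  let var_lower := PySem.Chars.lower var_name.toList
  if pyExcludeExact.contains var_lower then true
  else if pyExcludeSuffixes.any (fun suffix => PySem.Chars.endswith var_lower suffix) then true
  else false

-- ===== PORT B =====
-- Source B builds its word lists by splitting one space-separated string.
def altBases : List (List Char) :=
  PySem.Chars.splitOn
    "format type kind mode style encoding message error text value name key title label description".toList
    " ".toList

def altOther : List (List Char) :=
  PySem.Chars.splitOn
    "ctx context self cls args kwargs data result output input verbose strict details".toList
    " ".toList

-- exact hand port of low.rpartition("_")[2]: the characters after the last
-- underscore, or the whole string when it has no underscore.
def altLastToken (cs : List Char) : List Char :=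
  (cs.reverse.takeWhile (fun c => c ≠ '_')).reverse

def is_excluded_variable_name_py_alt (var_name : String) : Bool :=
  let low := PySem.Chars.lower var_name.toList
  altBases.contains (altLastToken low) || altOther.contains low

-- ===== PRECONDITION & SPEC =====
def Spec_is_excluded_variable_name_py (var_name : String) (out : Bool) : Prop := out = is_excluded_variable_name_py_alt var_name
instance (var_name : String) (out : Bool) : Decidable (Spec_is_excluded_variable_name_py var_name out) := by unfold Spec_is_excluded_variable_name_py; infer_instance

-- ===== CLAIM =====
def Claim_equal_is_excluded_variable_name_py : Prop := ∀ (var_name : String), Dom_is_excluded_variable_name_py var_name → Spec_is_excluded_variable_name_py var_name (is_excluded_variable_name_py var_name)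

-- ===== LEMMAS AND PROOFS =====

-- Python's (u ++ "_") prefix test against the reversed string, characterised by takeWhile.
theorem prefix_snoc_takeWhile (u r : List Char) (h : '_' ∉ u) :
    (u ++ ['_']) <+: r ↔ '_' ∈ r ∧ r.takeWhile (fun c => c ≠ '_') = u := by
  constructor
  · rintro ⟨t, rfl⟩
    refine ⟨by simp, ?_⟩
    induction u with
    | nil => simp
    | cons a u ih =>
      simp only [List.mem_cons, not_or] at h
      have htail := ih h.2
      have ha : a ≠ '_' := fun hh => h.1 hh.symm
      show List.takeWhile _ (a :: (u ++ ['_'] ++ t)) = a :: u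
      rw [List.takeWhile_cons_of_pos (by simp [ha])]
      exact congrArg (List.cons a) htail
  · rintro ⟨hmem, htw⟩
    have hdrop : r.dropWhile (fun c => c ≠ '_') ≠ [] := by
      intro hnil
      have := (List.dropWhile_eq_nil_iff).mp hnil '_' hmem
      simp at this
    obtain ⟨d, t, hdt⟩ := List.exists_cons_of_ne_nil hdrop
    have hd' : d = '_' := by
      have h0 := List.head_dropWhile_not (fun c : Char => (c ≠ '_' : Bool)) (l := r) hdrop
      simp only [hdt, List.head_cons] at h0
      simpa using h0
    refine ⟨t, ?_⟩
    have happ := List.takeWhile_append_dropWhile (p := fun c : Char => (c ≠ '_' : Bool)) (l := r)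
    rw [htw, hdt, hd'] at happ
    simpa using happ

-- endswith with a "_<w>" suffix, for w without underscores, is exactly
-- "contains an underscore and the token after the last underscore equals w".
theorem endswith_underscore (cs w : List Char) (h : '_' ∉ w) :
    PySem.Chars.endswith cs ('_' :: w)
      = (decide ('_' ∈ cs) && altLastToken cs == w) := by
  rw [Bool.eq_iff_iff]
  rw [PySem.Chars.endswith_iff]
  have hrev : ('_' :: w) <:+ cs ↔ (w.reverse ++ ['_']) <+: cs.reverse := by
    rw [← List.reverse_prefix]
    simp
  rw [hrev, prefix_snoc_takeWhile _ _ (by simpa using h)]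
  have hmem : '_' ∈ cs.reverse ↔ '_' ∈ cs := by simp
  constructor
  · rintro ⟨h1, h2⟩
    simp only [Bool.and_eq_true, beq_iff_eq, decide_eq_true_eq]
    refine ⟨hmem.mp h1, ?_⟩
    unfold altLastToken
    rw [h2]
    simp
  · intro hb
    simp only [Bool.and_eq_true, beq_iff_eq, decide_eq_true_eq] at hb
    obtain ⟨h1, h2⟩ := hb
    refine ⟨hmem.mpr h1, ?_⟩
    unfold altLastToken at h2
    have := congrArg List.reverse h2
    simpa using this

-- when the string has no underscore, the last token is the whole string
theorem lastToken_of_not_mem (cs : List Char) (h : '_' ∉ cs) : altLastToken cs = cs := by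
  unfold altLastToken
  have : cs.reverse.takeWhile (fun c => (c ≠ '_' : Bool)) = cs.reverse := by
    apply List.takeWhile_eq_self_iff.mpr
    intro c hc
    have : c ∈ cs := List.mem_reverse.mp hc
    simp only [ne_eq, decide_eq_true_eq]
    exact fun he => h (he ▸ this)
  rw [this, List.reverse_reverse]

-- ===== VERDICT =====
theorem is_excluded_variable_name_py_spec : Claim_equal_is_excluded_variable_name_py := by
  intro var_name _
  unfold Spec_is_excluded_variable_name_py
  unfold is_excluded_variable_name_py is_excluded_variable_name_py_alt
  set cs := PySem.Chars.lower var_name.toList with hcs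
  have h1 : altBases =
      ["format".toList, "type".toList, "kind".toList, "mode".toList, "style".toList,
       "encoding".toList, "message".toList, "error".toList, "text".toList, "value".toList,
       "name".toList, "key".toList, "title".toList, "label".toList, "description".toList] := by
    decide
  have key : (pyExcludeSuffixes.any fun suffix => PySem.Chars.endswith cs suffix)
      = (decide ('_' ∈ cs) && altBases.contains (altLastToken cs)) := by
    have e1 := endswith_underscore cs "format".toList (by decide)
    have e2 := endswith_underscore cs "type".toList (by decide)
    have e3 := endswith_underscore cs "kind".toList (by decide)
    have e4 := endswith_underscore cs "mode".toList (by decide)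
    have e5 := endswith_underscore cs "style".toList (by decide)
    have e6 := endswith_underscore cs "encoding".toList (by decide)
    have e7 := endswith_underscore cs "message".toList (by decide)
    have e8 := endswith_underscore cs "error".toList (by decide)
    have e9 := endswith_underscore cs "text".toList (by decide)
    have e10 := endswith_underscore cs "value".toList (by decide)
    have e11 := endswith_underscore cs "key".toList (by decide)
    have e12 := endswith_underscore cs "name".toList (by decide)
    have e13 := endswith_underscore cs "title".toList (by decide)
    have e14 := endswith_underscore cs "label".toList (by decide)
    have e15 := endswith_underscore cs "description".toList (by decide)
    simp only [pyExcludeSuffixes, List.any_cons, List.any_nil]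
    rw [show "_format".toList = '_' :: "format".toList from rfl, e1]
    rw [show "_type".toList = '_' :: "type".toList from rfl, e2]
    rw [show "_kind".toList = '_' :: "kind".toList from rfl, e3]
    rw [show "_mode".toList = '_' :: "mode".toList from rfl, e4]
    rw [show "_style".toList = '_' :: "style".toList from rfl, e5]
    rw [show "_encoding".toList = '_' :: "encoding".toList from rfl, e6]
    rw [show "_message".toList = '_' :: "message".toList from rfl, e7]
    rw [show "_error".toList = '_' :: "error".toList from rfl, e8]
    rw [show "_text".toList = '_' :: "text".toList from rfl, e9]
    rw [show "_value".toList = '_' :: "value".toList from rfl, e10]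
    rw [show "_key".toList = '_' :: "key".toList from rfl, e11]
    rw [show "_name".toList = '_' :: "name".toList from rfl, e12]
    rw [show "_title".toList = '_' :: "title".toList from rfl, e13]
    rw [show "_label".toList = '_' :: "label".toList from rfl, e14]
    rw [show "_description".toList = '_' :: "description".toList from rfl, e15]
    rw [h1]
    cases hu : decide ('_' ∈ cs) <;>
      simp [Bool.beq_eq_decide_eq]
  have exactSplit : pyExcludeExact.contains cs = (altBases.contains cs || altOther.contains cs) := by
    have h2 : altOther =
        ["ctx".toList, "context".toList, "self".toList, "cls".toList, "args".toList,
         "kwargs".toList, "data".toList, "result".toList, "output".toList, "input".toList,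
         "verbose".toList, "strict".toList, "details".toList] := by decide
    have hperm : pyExcludeExact.Perm (altBases ++ altOther) := by
      rw [h1, h2]; decide
    rw [Bool.eq_iff_iff]
    simp only [Bool.or_eq_true, List.contains_iff_mem]
    rw [hperm.mem_iff, List.mem_append]
  show (if pyExcludeExact.contains cs = true then true
      else if (pyExcludeSuffixes.any fun suffix => PySem.Chars.endswith cs suffix) = true
      then true else false)
    = (altBases.contains (altLastToken cs) || altOther.contains cs)
  by_cases hm : '_' ∈ cs
  · have hb0 : altBases.contains cs = false := by
      by_contra hne
      have hc : cs ∈ altBases := by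
        revert hne; cases h : altBases.contains cs <;> simp_all
      exact (by decide : ∀ w ∈ altBases, '_' ∉ w) cs hc hm
    have hd : decide ('_' ∈ cs) = true := by simpa using hm
    rw [key, exactSplit, hb0, hd]
    cases ho : altOther.contains cs <;>
      cases hb : altBases.contains (altLastToken cs) <;> simp
  · have hlt := lastToken_of_not_mem cs hm
    have hd : decide ('_' ∈ cs) = false := by simpa using hm
    rw [key, exactSplit, hlt, hd]
    cases ho : altOther.contains cs <;> cases hb : altBases.contains cs <;> simp
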